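-- pv_equiv track=rewrite | github.com/ITIS-Kien/DSA-2025 | Polygon/Untitled-1.py | generate
-- ===== SOURCE A (Python) =====
-- def check(n, k, a):
--     cnt = 0
--     res = 0
--     for i in range(n):
--         if a[i] == 1:  # Ký tự 'B'
--             if cnt == k:
--                 res += 1
--             cnt = 0
--         else:  # Ký tự 'A'
--             cnt += 1
--     if cnt == k:  # Kiểm tra chuỗi kết thúc bằng 'A'
--         res += 1
--     return res == 1
--
-- def generate(n, k):
--     a = [0] * n  # Khởi tạo xâu toàn 'A' (0 đại diện cho 'A', 1 đại diện cho 'B')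
--     results = []
--
--     while True:
--         if check(n, k, a):  # Kiểm tra nếu xâu thỏa mãn điều kiện
--             results.append("".join(['A' if x == 0 else 'B' for x in a]))
--
--         # Sinh xâu nhị phân tiếp theo
--         for i in range(n - 1, -1, -1):
--             if a[i] == 0:
--                 a[i] = 1
--                 break
--             else:
--                 a[i] = 0
--         else:
--             break  # Kết thúc khi đã duyệt hết tất cả các xâu
--
--     return results
-- ===== SOURCE B (Python) =====
-- def generate(n, k):
--     def strings(m):
--         if m <= 0:
--             return ['']
--         return [c + t for c in 'AB' for t in strings(m - 1)]
--     return [s for s in strings(n)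
--             if sum(len(seg) == k for seg in s.split('B')) == 1]
-- ===== Notes on version B (the rewrite author's own statement) =====
-- stated objective: simpler
-- what changed: B replaces A's in-place binary-counter increment plus accumulator run-scan by a recursive enumeration of all A/B strings and a declarative split('B')-and-count filter.
import Mathlib
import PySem

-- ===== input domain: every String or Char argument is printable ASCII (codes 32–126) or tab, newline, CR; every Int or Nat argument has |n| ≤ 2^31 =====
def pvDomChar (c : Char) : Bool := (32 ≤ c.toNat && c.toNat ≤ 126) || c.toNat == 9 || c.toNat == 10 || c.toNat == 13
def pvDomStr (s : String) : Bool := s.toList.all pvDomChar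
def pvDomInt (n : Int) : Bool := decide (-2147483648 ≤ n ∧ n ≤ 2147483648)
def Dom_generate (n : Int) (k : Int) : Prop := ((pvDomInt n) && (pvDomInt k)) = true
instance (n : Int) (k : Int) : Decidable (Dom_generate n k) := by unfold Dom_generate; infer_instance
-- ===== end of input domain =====

-- B replaces A's in-place binary-counter increment and accumulator run-scan by a recursive
-- enumeration of the candidate strings and a declarative split('B')-and-count filter; objective: simpler.

-- ===== PORT A =====
-- check(n, k, a): the loop 'for i in range(n)' with state (cnt, res); a[i] is read with
-- pyGetD (exact here: generate only calls check with len(a) = max(n, 0), so every index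
-- of range(n) is in range and Python never raises).
def checkA (n : Int) (k : Int) (a : List Int) : Bool :=
  let st := (PySem.List.pyRange 0 n 1).foldl
    (fun (st : Int × Int) i =>
      if PySem.List.pyGetD a i 0 == 1 then
        ((0 : Int), if st.1 == k then st.2 + 1 else st.2)
      else (st.1 + 1, st.2)) ((0 : Int), (0 : Int))
  (if st.1 == k then st.2 + 1 else st.2) == 1

-- the inner 'for i in range(n-1, -1, -1): …' of generate, scanning a from its last
-- element: incRev acts on the reversed list (a[n-1] first); none = the for-else branch
-- (no break: every digit was 1), i.e. the while loop ends.
def incRev : List Int → Option (List Int)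
  | [] => none
  | x :: xs => if x == 0 then some (1 :: xs) else (incRev xs).map (0 :: ·)

def nextA (a : List Int) : Option (List Int) := (incRev a.reverse).map List.reverse

-- "".join(['A' if x == 0 else 'B' for x in a])
def toStrA (a : List Int) : String :=
  PySem.Str.join "" (a.map (fun x => if x == 0 then "A" else "B"))

-- termination measure for the 'while True' loop: the binary counter strictly increases
def valR : List Int → Nat
  | [] => 0
  | x :: xs => (if x = 0 then 0 else 1) + 2 * valR xs

theorem incRev_some : ∀ (l r : List Int), incRev l = some r →
    r.length = l.length ∧ valR r = valR l + 1 := by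
  intro l
  induction l with
  | nil => intro r h; simp [incRev] at h
  | cons x xs ih =>
    intro r h
    by_cases hx : x = 0
    · subst hx; simp [incRev] at h
      subst h; simp [valR]; omega
    · simp [incRev, hx] at h
      obtain ⟨r', hr', rfl⟩ := h
      obtain ⟨h1, h2⟩ := ih r' hr'
      simp [valR, hx, h1, h2]
      omega

theorem valR_lt (l : List Int) : valR l < 2 ^ l.length := by
  induction l with
  | nil => simp [valR]
  | cons x xs ih => simp [valR, pow_succ]; split_ifs <;> omega

theorem nextA_some {a a' : List Int} (h : nextA a = some a') :
    a'.length = a.length ∧ valR a'.reverse = valR a.reverse + 1 := by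
  unfold nextA at h
  obtain ⟨r, hr, rfl⟩ : ∃ r, incRev a.reverse = some r ∧ a' = r.reverse := by
    cases hh : incRev a.reverse <;> simp [hh] at h <;> simp [← h]
  obtain ⟨h1, h2⟩ := incRev_some _ _ hr
  simp at h1
  simp [h1, h2]

-- the 'while True' loop of generate
def loopA (n : Int) (k : Int) (a : List Int) : List String :=
  match h : nextA a with
  | none => if checkA n k a then [toStrA a] else []
  | some a' => (if checkA n k a then [toStrA a] else []) ++ loopA n k a'
termination_by 2 ^ a.length - valR a.reverse
decreasing_by
  have h1 := nextA_some h
  have h2 := valR_lt a.reverse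
  have h3 : 2 ^ a'.length = 2 ^ a.length := by rw [h1.1]
  simp only [List.length_reverse] at h2
  omega

def generate (n : Int) (k : Int) : List String :=
  loopA n k (PySem.List.pyRepeat [(0 : Int)] n)

-- ===== PORT B =====
-- strings(m): each string c + t is formed by consing the code point c onto t's code
-- points and rebuilding the string (String.ofList; exact for 1-char c).
def stringsB (m : Int) : List String :=
  if m ≤ 0 then [""]
  else "AB".toList.flatMap
    (fun c => (stringsB (m - 1)).map (fun t => String.ofList (c :: t.toList)))
termination_by m.toNat
decreasing_by omega

-- s.split('B') is Chars.splitOn on the code points (separator nonempty, so exact);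
-- sum(len(seg) == k for seg in …) is the sum of the 0/1 indicators.
def generate_alt (n : Int) (k : Int) : List String :=
  (stringsB n).filter (fun s =>
    ((PySem.Chars.splitOn s.toList ['B']).map
        (fun seg => if PySem.Chars.len seg == k then (1 : Int) else 0)).sum == 1)

-- ===== PRECONDITION & SPEC =====
def Spec_generate (n : Int) (k : Int) (out : List String) : Prop := out = generate_alt n k
instance (n : Int) (k : Int) (out : List String) : Decidable (Spec_generate n k out) := by unfold Spec_generate; infer_instance

-- ===== CLAIM (what is proved, stated in full; the proofs are below) =====
def Claim_equal_generate : Prop := ∀ (n : Int) (k : Int), Dom_generate n k → Spec_generate n k (generate n k)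

-- ===== LEMMAS AND PROOFS =====

theorem splitOn_go (b : Char) : ∀ (fuel : Nat) (l cur : List Char) (acc : List (List Char)),
    l.length ≤ fuel →
    PySem.Chars.splitOn.go [b] fuel l cur acc
      = acc.reverse ++ (l.splitOn b).modifyHead (cur.reverse ++ ·) := by
  intro fuel
  induction fuel with
  | zero =>
    intro l cur acc h
    have : l = [] := by cases l <;> simp_all
    subst this
    rw [PySem.Chars.splitOn.go]
    simp [List.splitOn, List.splitOnP_nil]
  | succ f ih =>
    intro l cur acc h
    cases l with
    | nil =>
      rw [PySem.Chars.splitOn.go]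
      · simp [List.splitOn, List.splitOnP_nil]
      · simp
    | cons c rest =>
      by_cases hc : c = b
      · subst hc
        have hpre : List.isPrefixOf [c] (c :: rest) = true := by simp [List.isPrefixOf]
        rw [PySem.Chars.splitOn.go]
        simp only [hpre, if_pos]
        rw [ih (List.drop [c].length (c :: rest)) [] (cur.reverse :: acc)
          (by simpa using Nat.le_of_succ_le_succ h)]
        simp only [List.splitOn, List.splitOnP_cons]
        simp only [beq_self_eq_true, if_true, List.modifyHead_cons, List.append_nil,
          List.reverse_cons, List.append_assoc, List.nil_append, List.singleton_append,
          List.tail_cons]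
        have : List.modifyHead (fun x : List Char => x) (List.splitOnP (fun x => x == c) rest)
            = List.splitOnP (fun x => x == c) rest := by
          cases List.splitOnP (fun x => x == c) rest <;> simp
        simp [this]
      · have hpre : List.isPrefixOf [b] (c :: rest) = false := by
          simp [List.isPrefixOf]; exact fun hh => (hc hh.symm).elim
        rw [PySem.Chars.splitOn.go]
        simp only [hpre]
        rw [ih rest (c :: cur) acc (by simpa using Nat.le_of_succ_le_succ h)]
        simp only [List.splitOn, List.splitOnP_cons, beq_iff_eq, hc, if_false,
          List.modifyHead_modifyHead]
        cases List.splitOnP (fun x => x == b) rest <;> simp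

theorem chars_splitOn_single (b : Char) (cs : List Char) :
    PySem.Chars.splitOn cs [b] = cs.splitOn b := by
  rw [PySem.Chars.splitOn, splitOn_go b (cs.length + 1) cs [] [] (by omega)]
  cases cs.splitOn b <;> simp

theorem incRev_append (l m : List Int) :
    incRev (l ++ m) = match incRev l with
      | some r => some (r ++ m)
      | none => (incRev m).map (fun r => l.map (fun _ => (0:Int)) ++ r) := by
  induction l with
  | nil => cases h : incRev m <;> simp [incRev, h]
  | cons x xs ih =>
    by_cases hx : x = 0
    · subst hx; simp [incRev]
    · simp only [List.cons_append, incRev, beq_iff_eq, hx, if_false, ih]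
      cases h : incRev xs with
      | some r => simp
      | none => cases incRev m <;> simp

theorem nextA_cons_some {t t' : List Int} (h : nextA t = some t') (x : Int) :
    nextA (x :: t) = some (x :: t') := by
  unfold nextA at h ⊢
  obtain ⟨r, hr, rfl⟩ : ∃ r, incRev t.reverse = some r ∧ t' = r.reverse := by
    cases hh : incRev t.reverse <;> simp [hh] at h <;> simp [← h]
  rw [List.reverse_cons, incRev_append, hr]
  simp

theorem nextA_cons_none_zero {t : List Int} (h : nextA t = none) :
    nextA (0 :: t) = some (1 :: t.map (fun _ => (0:Int))) := by
  unfold nextA at h ⊢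
  have hr : incRev t.reverse = none := by
    cases hh : incRev t.reverse <;> simp [hh] at h ⊢
  rw [List.reverse_cons, incRev_append, hr]
  simp [incRev, ← List.map_reverse]

theorem nextA_cons_none_ne {t : List Int} (h : nextA t = none) {x : Int} (hx : x ≠ 0) :
    nextA (x :: t) = none := by
  unfold nextA at h ⊢
  have hr : incRev t.reverse = none := by
    cases hh : incRev t.reverse <;> simp [hh] at h ⊢
  rw [List.reverse_cons, incRev_append, hr]
  simp [incRev, hx]

def seqA (a : List Int) : List (List Int) :=
  match h : nextA a with
  | none => [a]
  | some a' => a :: seqA a'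
termination_by 2 ^ a.length - valR a.reverse
decreasing_by
  have h1 := nextA_some h
  have h2 := valR_lt a.reverse
  have h3 : 2 ^ a'.length = 2 ^ a.length := by rw [h1.1]
  simp only [List.length_reverse] at h2
  omega

theorem seqA_of_none {a : List Int} (h : nextA a = none) : seqA a = [a] := by
  rw [seqA, h]

theorem seqA_of_some {a a' : List Int} (h : nextA a = some a') : seqA a = a :: seqA a' := by
  rw [seqA, h]

theorem seqA_cons_ne (x : Int) (hx : x ≠ 0) : ∀ t, seqA (x :: t) = (seqA t).map (x :: ·) := by
  intro t
  fun_induction seqA t with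
  | case1 t h => rw [seqA_of_none (nextA_cons_none_ne h hx)]; simp
  | case2 t t' h ih => rw [seqA_of_some (nextA_cons_some h x)]; simp [ih]

theorem seqA_cons_zero : ∀ t, seqA (0 :: t) = (seqA t).map ((0:Int) :: ·) ++ seqA (1 :: t.map (fun _ => (0:Int))) := by
  intro t
  fun_induction seqA t with
  | case1 t h => rw [seqA_of_some (nextA_cons_none_zero h)]; simp
  | case2 t t' h ih =>
    rw [seqA_of_some (nextA_cons_some h 0), ih]
    have : t'.map (fun _ => (0:Int)) = t.map (fun _ => (0:Int)) := by
      have := (nextA_some h).1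
      rw [List.map_const', List.map_const', this]
    rw [this]
    simp

def allBits : Nat → List (List Int)
  | 0 => [[]]
  | m + 1 => (allBits m).map ((0:Int) :: ·) ++ (allBits m).map ((1:Int) :: ·)

theorem seqA_replicate (m : Nat) : seqA (List.replicate m 0) = allBits m := by
  induction m with
  | zero => rw [List.replicate_zero, seqA_of_none rfl]; rfl
  | succ m ih =>
    rw [List.replicate_succ, seqA_cons_zero, List.map_const', List.length_replicate,
      seqA_cons_ne 1 (by norm_num), ih]
    rfl

theorem mem_allBits : ∀ (m : Nat) (a : List Int), a ∈ allBits m →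
    (∀ x ∈ a, x = 0 ∨ x = 1) ∧ a.length = m := by
  intro m
  induction m with
  | zero => intro a h; simp [allBits] at h; simp [h]
  | succ m ih =>
    intro a h
    simp only [allBits, List.mem_append, List.mem_map] at h
    rcases h with ⟨b, hb, rfl⟩ | ⟨b, hb, rfl⟩ <;>
      obtain ⟨h1, h2⟩ := ih b hb <;> constructor <;> simp_all <;> omega

def bitChar (x : Int) : Char := if x = 0 then 'A' else 'B'

def stepA (k : Int) (st : Int × Int) (x : Int) : Int × Int :=
  if x == 1 then ((0:Int), if st.1 == k then st.2 + 1 else st.2) else (st.1 + 1, st.2)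

def resOf (k : Int) (st : Int × Int) : Int := if st.1 == k then st.2 + 1 else st.2

theorem foldl_check (k : Int) : ∀ (a : List Int) (cnt res : Int) (s0 : List Char) (rest : List (List Char)),
    (∀ x ∈ a, x = 0 ∨ x = 1) →
    (a.map bitChar).splitOn 'B' = s0 :: rest →
    resOf k (a.foldl (stepA k) (cnt, res))
    = res + (if cnt + (s0.length : Int) = k then 1 else 0)
        + (rest.map (fun seg => if (seg.length : Int) = k then (1:Int) else 0)).sum := by
  intro a
  induction a with
  | nil =>
    intro cnt res s0 rest _ hsp
    simp [List.splitOn, List.splitOnP_nil] at hsp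
    obtain ⟨rfl, rfl⟩ := hsp
    simp only [List.foldl_nil, resOf, List.length_nil, Nat.cast_zero, add_zero, List.map_nil,
      List.sum_nil, beq_iff_eq]
    split_ifs <;> omega
  | cons x a' ih =>
    intro cnt res s0 rest hbits hsp
    rcases hbits x (List.mem_cons_self) with rfl | rfl
    · -- x = 0, an 'A'
      have hb : bitChar 0 = 'A' := rfl
      rw [List.map_cons, hb] at hsp
      rw [List.splitOn, List.splitOnP_cons] at hsp
      simp only [show (('A' == 'B') = false) from rfl, if_false] at hsp
      obtain ⟨s0', rest', hsp'⟩ : ∃ s0' rest',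
          List.splitOnP (fun x => x == 'B') (a'.map bitChar) = s0' :: rest' := by
        cases hh : List.splitOnP (fun x => x == 'B') (a'.map bitChar) with
        | nil => exact absurd hh (List.splitOnP_ne_nil _ _)
        | cons u v => exact ⟨u, v, rfl⟩
      rw [hsp', List.modifyHead_cons] at hsp
      obtain ⟨rfl, rfl⟩ := List.cons.injEq .. ▸ hsp
      have hbits' : ∀ x ∈ a', x = 0 ∨ x = 1 := fun x hx => hbits x (List.mem_cons_of_mem _ hx)
      rw [List.foldl_cons, show stepA k (cnt, res) 0 = (cnt + 1, res) from rfl]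
      rw [ih (cnt + 1) res s0' rest' hbits' (by rw [List.splitOn]; exact hsp')]
      have : cnt + (↑(('A' :: s0').length) : Int) = cnt + 1 + ↑s0'.length := by
        push_cast [List.length_cons]; ring
      rw [this]
    · -- x = 1, a 'B'
      have hb : bitChar 1 = 'B' := rfl
      rw [List.map_cons, hb] at hsp
      rw [List.splitOn, List.splitOnP_cons] at hsp
      simp only [show (('B' == 'B') = true) from rfl, if_true] at hsp
      obtain ⟨s0', rest', hsp'⟩ : ∃ s0' rest',
          List.splitOnP (fun x => x == 'B') (a'.map bitChar) = s0' :: rest' := by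
        cases hh : List.splitOnP (fun x => x == 'B') (a'.map bitChar) with
        | nil => exact absurd hh (List.splitOnP_ne_nil _ _)
        | cons u v => exact ⟨u, v, rfl⟩
      rw [hsp'] at hsp
      obtain ⟨rfl, rfl⟩ := List.cons.injEq .. ▸ hsp
      have hbits' : ∀ x ∈ a', x = 0 ∨ x = 1 := fun x hx => hbits x (List.mem_cons_of_mem _ hx)
      rw [List.foldl_cons,
        show stepA k (cnt, res) 1 = ((0:Int), if cnt == k then res + 1 else res) from rfl]
      rw [ih 0 (if cnt == k then res + 1 else res) s0' rest' hbits'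
        (by rw [List.splitOn]; exact hsp')]
      simp only [List.map_cons, List.sum_cons, List.length_nil, Nat.cast_zero, add_zero,
        beq_iff_eq, zero_add]
      split_ifs <;> ring

-- checkA via the element-level fold
theorem checkA_eq (n k : Int) (a : List Int) (hlen : a.length = n.toNat) :
    checkA n k a = (resOf k (a.foldl (stepA k) (0, 0)) == 1) := by
  unfold checkA resOf
  rcases le_or_gt n 0 with hn | hn
  · have h1 : PySem.List.pyRange 0 n 1 = [] := PySem.List.pyRange_one_eq_nil hn
    have h2 : a = [] := by
      have : n.toNat = 0 := by omega
      simpa [this, List.length_eq_zero_iff] using hlen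
    rw [h1, h2]
    rfl
  · have hn' : PySem.List.len a = n := by
      simp [PySem.List.len_eq, hlen]; omega
    have := PySem.List.foldl_pyRange_pyGetD a 0 (stepA k) ((0:Int), (0:Int)) (le_refl 0)
    rw [hn'] at this
    simp only [Int.toNat_zero, List.drop_zero] at this
    rw [← this]
    rfl

theorem toStrA_eq (a : List Int) : toStrA a = String.ofList (a.map bitChar) := by
  have h : (toStrA a).toList = a.map bitChar := by
    unfold toStrA
    rw [PySem.Str.toList_join]
    have h1 : (a.map (fun x => if x == 0 then "A" else "B")).map String.toList
        = (a.map bitChar).map (fun c => [c]) := by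
      rw [List.map_map, List.map_map]
      refine List.map_congr_left (fun x _ => ?_)
      by_cases hx : x = 0 <;> simp [hx, bitChar]
    rw [h1]
    simpa using PySem.Chars.join_nil_singletons (a.map bitChar)
  rw [← h, String.ofList_toList]

theorem stringsB_eq : ∀ (m : Int),
    stringsB m = (allBits m.toNat).map (fun a => String.ofList (a.map bitChar)) := by
  intro m
  fun_induction stringsB m with
  | case1 m hm =>
    have : m.toNat = 0 := by omega
    simp [this, allBits]
  | case2 m hm ih =>
    obtain ⟨t, ht⟩ : ∃ t, m.toNat = t + 1 := ⟨(m - 1).toNat, by omega⟩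
    have ht' : (m - 1).toNat = t := by omega
    rw [ih, ht, ht']
    rw [show "AB".toList = ['A', 'B'] from rfl]
    simp only [allBits, List.flatMap_cons, List.flatMap_nil, List.map_map, List.map_append,
      List.map_map, List.append_nil]
    congr 1 <;> refine List.map_congr_left (fun b _ => ?_) <;>
      simp [Function.comp, bitChar, String.toList_ofList]

theorem loopA_eq (n k : Int) : ∀ a, loopA n k a = ((seqA a).filter (checkA n k)).map toStrA := by
  intro a
  fun_induction loopA n k a with
  | case1 a h hc => rw [seqA_of_none h]; simp [hc]
  | case2 a h hc => rw [seqA_of_none h]; simp [hc]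
  | case3 a a' h ih =>
    rw [seqA_of_some h, List.filter_cons, ih]
    by_cases hc : checkA n k a <;> simp [hc]

-- the B-side filter predicate, evaluated on a bit list of length n.toNat
theorem pred_eq (n k : Int) (a : List Int) (hbits : ∀ x ∈ a, x = 0 ∨ x = 1)
    (hlen : a.length = n.toNat) :
    checkA n k a
      = (((PySem.Chars.splitOn (String.ofList (a.map bitChar)).toList ['B']).map
          (fun seg => if PySem.Chars.len seg == k then (1 : Int) else 0)).sum == 1) := by
  rw [checkA_eq n k a hlen, String.toList_ofList, chars_splitOn_single]
  obtain ⟨s0, rest, hsp⟩ : ∃ s0 rest, (a.map bitChar).splitOn 'B' = s0 :: rest := by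
    cases hh : (a.map bitChar).splitOn 'B' with
    | nil => exact absurd hh (by rw [List.splitOn]; exact List.splitOnP_ne_nil _ _)
    | cons u v => exact ⟨u, v, rfl⟩
  rw [hsp, foldl_check k a 0 0 s0 rest hbits hsp]
  have : ((s0 :: rest).map (fun seg => if PySem.Chars.len seg == k then (1 : Int) else 0)).sum
      = (0 + if (0:Int) + (s0.length : Int) = k then 1 else 0)
        + (rest.map (fun seg => if (seg.length : Int) = k then (1:Int) else 0)).sum := by
    simp only [List.map_cons, List.sum_cons, PySem.Chars.len, beq_iff_eq, zero_add]
  rw [this]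

theorem generate_eq_alt (n k : Int) : generate n k = generate_alt n k := by
  have hA : generate n k
      = ((allBits n.toNat).filter (checkA n k)).map (fun a => String.ofList (a.map bitChar)) := by
    unfold generate
    rw [PySem.List.pyRepeat_singleton, loopA_eq, seqA_replicate]
    exact List.map_congr_left (fun a _ => toStrA_eq a)
  have hB : generate_alt n k
      = ((allBits n.toNat).filter (fun a =>
            ((PySem.Chars.splitOn (String.ofList (a.map bitChar)).toList ['B']).map
              (fun seg => if PySem.Chars.len seg == k then (1 : Int) else 0)).sum == 1)).map
          (fun a => String.ofList (a.map bitChar)) := by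
    unfold generate_alt
    rw [stringsB_eq, List.filter_map]
    exact congrArg _ (List.filter_congr (fun a _ => rfl))
  rw [hA, hB]
  exact congrArg _ (List.filter_congr (fun a ha =>
    pred_eq n k a (mem_allBits _ a ha).1 (mem_allBits _ a ha).2))

-- ===== VERDICT (by name: the statement is the Claim_ definition above) =====
theorem generate_spec : Claim_equal_generate := by
  intro n k _
  exact generate_eq_alt n k
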